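-- pv_equiv track=rewrite | github.com/DavidingPlus/algorithm | 蓝桥杯复习/2023/刷题/3.5/5(time run out!!!).py | num_onetime
-- ===== SOURCE A (Python) =====
-- def num_onetime(strs: str) -> int:
--     # 将字符和出现次数的信息传入字典中
--     str_dict = dict()
--     for ch in strs:
--         try:
--             str_dict[ch]
--         except KeyError:
--             str_dict[ch] = 1
--         else:
--             str_dict[ch] += 1
--     # 得到字典过后遍历字典来找到出现一次的字符个数
--     keys = str_dict.keys()
--     count = 0
--     for key in keys:
--         if str_dict[key] == 1:
--             count += 1
--     return count
-- ===== SOURCE B (Python) =====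
-- def num_onetime(strs: str) -> int:
--     # sort the characters, then count maximal runs of equal characters of length 1
--     s = sorted(strs)
--     count = 0
--     while s:
--         run = 1
--         while run < len(s) and s[run] == s[0]:
--             run += 1
--         if run == 1:
--             count += 1
--         s = s[run:]
--     return count
-- ===== Notes on version B (the rewrite author's own statement) =====
-- stated objective: alternative
-- what changed: Replaces the try/except hash-table frequency dictionary plus key scan with sort-then-scan: sort the characters and count maximal runs of identical characters whose length is exactly 1.
import Mathlib
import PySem

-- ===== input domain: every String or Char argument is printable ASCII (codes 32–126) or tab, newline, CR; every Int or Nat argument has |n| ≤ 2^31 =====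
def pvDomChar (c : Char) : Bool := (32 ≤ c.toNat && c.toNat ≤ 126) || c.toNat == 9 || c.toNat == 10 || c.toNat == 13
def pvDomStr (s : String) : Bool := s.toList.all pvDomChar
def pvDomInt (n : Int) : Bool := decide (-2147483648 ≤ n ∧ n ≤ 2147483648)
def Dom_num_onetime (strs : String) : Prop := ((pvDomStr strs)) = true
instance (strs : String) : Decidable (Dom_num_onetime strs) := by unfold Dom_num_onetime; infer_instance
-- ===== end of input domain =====

-- B replaces A's try/except frequency dictionary + key scan by sorting the characters
-- and counting maximal runs of identical characters of length 1 (alternative algorithm).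


-- ===== PORT A =====
-- the try/except/else body of A's first loop:
-- try: str_dict[ch] / except KeyError: str_dict[ch] = 1 / else: str_dict[ch] += 1
def pvStepA (d : PySem.Dict Char Int) (ch : Char) : PySem.Dict Char Int :=
  match d.get? ch with
  | none => d.insert ch 1
  | some _ => d.modify ch 0 (· + 1)

def num_onetime (strs : String) : Int :=
  let str_dict := strs.toList.foldl pvStepA PySem.Dict.empty
  let keys := str_dict.keys
  -- str_dict[key] never raises here since key ∈ keys; getD is exact on present keys
  keys.foldl (fun count key => if str_dict.getD key 0 == 1 then count + 1 else count) 0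

-- ===== PORT B =====
-- the outer 'while s:' loop of Source B; the inner while extends run over chars equal to s[0]
def pvRuns : List Char → Int
  | [] => 0
  | a :: t =>
    let run := 1 + (t.takeWhile (fun c => c == a)).length
    (if run == 1 then (1 : Int) else 0) + pvRuns ((a :: t).drop run)
termination_by l => l.length
decreasing_by simp [List.length_drop]

def num_onetime_alt (strs : String) : Int :=
  pvRuns (PySem.List.sorted strs.toList (fun c => c) false)

-- ===== PRECONDITION & SPEC =====
def Spec_num_onetime (strs : String) (out : Int) : Prop := out = num_onetime_alt strs
instance (strs : String) (out : Int) : Decidable (Spec_num_onetime strs out) := by unfold Spec_num_onetime; infer_instance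

-- ===== CLAIM (what is proved, stated in full; the proofs are below) =====
def Claim_equal_num_onetime : Prop := ∀ (strs : String), Dom_num_onetime strs → Spec_num_onetime strs (num_onetime strs)

-- ===== LEMMAS AND PROOFS =====

-- the common value: number of distinct characters occurring exactly once
def pvN (xs : List Char) : Int :=
  ((PySem.List.dedup xs).countP (fun k => (xs.count k : Int) == 1) : Nat)

theorem pvN_perm {xs ys : List Char} (h : xs.Perm ys) : pvN xs = pvN ys := by
  unfold pvN
  have hmem : ∀ a : Char, a ∈ PySem.List.dedup xs ↔ a ∈ PySem.List.dedup ys := by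
    intro a
    simp [h.mem_iff]
  have hperm : (PySem.List.dedup xs).Perm (PySem.List.dedup ys) :=
    (List.perm_ext_iff_of_nodup (PySem.List.nodup_dedup xs) (PySem.List.nodup_dedup ys)).mpr hmem
  rw [hperm.countP_eq (fun k => (xs.count k : Int) == 1)]
  congr 1
  apply List.countP_congr
  intro a _
  simp [h.count_eq]

theorem num_onetime_eq_pvN (strs : String) : num_onetime strs = pvN strs.toList := by
  unfold num_onetime
  have hstep : pvStepA = (fun d x => d.modify x 0 (· + 1)) := by
    funext d ch
    unfold pvStepA
    cases h : d.get? ch with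
    | none => simp [PySem.Dict.modify, PySem.Dict.getD, h]
    | some v => rfl
  have hdict : strs.toList.foldl pvStepA PySem.Dict.empty = PySem.Dict.counter strs.toList := by
    rw [PySem.Dict.counter_eq_foldl, hstep]
  simp only [PySem.List.foldl_if_add_one]
  rw [hdict, PySem.Dict.keys_counter]
  unfold pvN
  rw [← PySem.List.dedup_eq_ofList]
  simp only [zero_add, Nat.cast_inj]
  apply List.countP_congr
  intro a _
  simp [PySem.Dict.getD_counter]

theorem pvRuns_eq_pvN (ys : List Char) (h : ys.Pairwise (· ≤ ·)) : pvRuns ys = pvN ys := by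
  match ys with
  | [] => simp [pvRuns, pvN, PySem.List.dedup]
  | a :: t =>
    have hk : ∀ c ∈ t.takeWhile (fun c => c == a), c = a := by
      intro c hc
      simpa using List.mem_takeWhile_imp hc
    have hsplit : t.takeWhile (fun c => c == a) ++ t.dropWhile (fun c => c == a) = t :=
      List.takeWhile_append_dropWhile
    have hr : t.drop (t.takeWhile (fun c => c == a)).length = t.dropWhile (fun c => c == a) := by
      nth_rewrite 2 [← hsplit]
      exact List.drop_left
    have ht : t.Pairwise (· ≤ ·) := h.sublist (List.sublist_cons_self a t)
    have hrs : (t.dropWhile (fun c => c == a)).Pairwise (· ≤ ·) :=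
      ht.sublist (List.dropWhile_sublist _)
    have hat : ∀ x ∈ t, a ≤ x := fun x hx => (List.pairwise_cons.mp h).1 x hx
    have hna : a ∉ t.dropWhile (fun c => c == a) := by
      intro hmem
      cases hdw : t.dropWhile (fun c => c == a) with
      | nil => rw [hdw] at hmem; exact absurd hmem (List.not_mem_nil)
      | cons b r' =>
        have hne : t.dropWhile (fun c => c == a) ≠ [] := by rw [hdw]; exact List.cons_ne_nil b r'
        have hbne : ¬ (b == a) = true := by
          have := List.head_dropWhile_not (fun c => c == a) hne
          simpa [hdw] using this
        have hba : a < b := by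
          have hbt : b ∈ t := (List.dropWhile_sublist _).mem (hdw ▸ List.mem_cons_self)
          rcases lt_or_eq_of_le (hat b hbt) with h' | h'
          · exact h'
          · exact absurd (by simp [← h']) hbne
        rw [hdw] at hmem
        rcases List.mem_cons.mp hmem with h' | h'
        · exact absurd (h' ▸ hba) (lt_irrefl a)
        · have : b ≤ a := (List.pairwise_cons.mp (hdw ▸ hrs)).1 a h'
          exact absurd (lt_of_lt_of_le hba this) (lt_irrefl a)
    -- occurrence counts: a occurs run-many times, other chars only in the rest
    have hck : (t.takeWhile (fun c => c == a)).count a = (t.takeWhile (fun c => c == a)).length := by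
      apply List.count_eq_length.mpr
      intro b hb
      simp [hk b hb]
    have hca : (a :: t).count a = (t.takeWhile (fun c => c == a)).length + 1 := by
      rw [List.count_cons_self]
      conv_lhs => rw [← hsplit]
      rw [List.count_append, hck]
      have : (t.dropWhile (fun c => c == a)).count a = 0 := List.count_eq_zero.mpr hna
      omega
    have hcc : ∀ c, c ≠ a → (a :: t).count c = (t.dropWhile (fun c => c == a)).count c := by
      intro c hc
      rw [List.count_cons_of_ne (fun hEq => hc hEq.symm)]
      conv_lhs => rw [← hsplit]
      rw [List.count_append]
      have : (t.takeWhile (fun c => c == a)).count c = 0 := by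
        apply List.count_eq_zero.mpr
        intro hmem
        exact hc (hk c hmem)
      omega
    -- the distinct characters of a :: t are a together with those of the rest
    have hperm : (PySem.List.dedup (a :: t)).Perm (a :: PySem.List.dedup (t.dropWhile (fun c => c == a))) := by
      apply (List.perm_ext_iff_of_nodup (PySem.List.nodup_dedup _) ?_).mpr
      · intro x
        simp only [PySem.List.mem_dedup, List.mem_cons]
        constructor
        · rintro (rfl | hx)
          · exact Or.inl rfl
          · rw [← hsplit] at hx
            rcases List.mem_append.mp hx with h' | h'
            · exact Or.inl (hk x h')
            · exact Or.inr h'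
        · rintro (rfl | hx)
          · exact Or.inl rfl
          · exact Or.inr ((List.dropWhile_sublist _).mem hx)
      · exact List.nodup_cons.mpr ⟨by simpa [PySem.List.mem_dedup] using hna, PySem.List.nodup_dedup _⟩
    have hpr : List.countP (fun k => ((a :: t).count k : Int) == 1)
        (PySem.List.dedup (t.dropWhile (fun c => c == a)))
        = List.countP (fun k => ((t.dropWhile (fun c => c == a)).count k : Int) == 1)
          (PySem.List.dedup (t.dropWhile (fun c => c == a))) := by
      apply List.countP_congr
      intro c hc
      have hcr : c ∈ t.dropWhile (fun c => c == a) := (PySem.List.mem_dedup _ _).mp hc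
      have : c ≠ a := fun hEq => hna (hEq ▸ hcr)
      simp [hcc c this]
    have hstep2 : pvRuns (a :: t) = (if (t.takeWhile (fun c => c == a)).length = 0 then (1:Int) else 0)
        + pvRuns (t.dropWhile (fun c => c == a)) := by
      rw [pvRuns]
      simp only [Nat.add_comm 1, List.drop_succ_cons, hr]
      congr 1
      simp
    have hrec : pvRuns (t.dropWhile (fun c => c == a)) = pvN (t.dropWhile (fun c => c == a)) :=
      pvRuns_eq_pvN (t.dropWhile (fun c => c == a)) hrs
    rw [hstep2, hrec]
    unfold pvN
    rw [hperm.countP_eq, List.countP_cons, hpr, hca]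
    by_cases h0 : (t.takeWhile (fun c => c == a)).length = 0
    · simp [h0]
      omega
    · simp [h0]
termination_by ys.length
decreasing_by
  have := List.length_dropWhile_le (fun c => c == a) t
  simp
  omega

-- ===== VERDICT (by name: the statement is the Claim_ definition above) =====
theorem num_onetime_spec : Claim_equal_num_onetime := by
  intro strs _
  unfold Spec_num_onetime num_onetime_alt
  rw [num_onetime_eq_pvN]
  rw [pvRuns_eq_pvN _ (PySem.List.sorted_pairwise strs.toList (fun c => c))]
  exact pvN_perm (PySem.List.sorted_perm strs.toList (fun c => c) false).symm
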